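-- pv_equiv track=rewrite | github.com/smekhnyov/labs_sinip | 1/main.py | EnterMatrix
-- ===== SOURCE A (Python) =====
-- def EnterMatrix(text, rows, cols):
--     index = 0
--     matrix = [[None for _ in range(cols)] for _ in range(rows)]
--     for row in range(rows):
--         for col in range(cols):
--             if index < len(text):
--                 matrix[row][col] = text[index]
--             else:
--                 matrix[row][col] = "_"
--             index += 1
--     return matrix
-- ===== SOURCE B (Python) =====
-- def EnterMatrix(text, rows, cols):
--     cols = max(cols, 0)  # a non-positive width means empty rows
--     matrix = []
--     for row in range(rows):
--         chunk = text[row * cols:(row + 1) * cols]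
--         matrix.append(list(chunk) + ["_"] * (cols - len(chunk)))
--     return matrix
-- ===== Notes on version B (the rewrite author's own statement) =====
-- stated objective: simpler
-- what changed: A preallocates a rows x cols matrix and fills it cell by cell with a running index and a per-cell bounds branch; B builds each row at once by slicing the text for that row and block-padding with '_', with no running index, no preallocation and no per-cell branch.
import Mathlib
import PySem

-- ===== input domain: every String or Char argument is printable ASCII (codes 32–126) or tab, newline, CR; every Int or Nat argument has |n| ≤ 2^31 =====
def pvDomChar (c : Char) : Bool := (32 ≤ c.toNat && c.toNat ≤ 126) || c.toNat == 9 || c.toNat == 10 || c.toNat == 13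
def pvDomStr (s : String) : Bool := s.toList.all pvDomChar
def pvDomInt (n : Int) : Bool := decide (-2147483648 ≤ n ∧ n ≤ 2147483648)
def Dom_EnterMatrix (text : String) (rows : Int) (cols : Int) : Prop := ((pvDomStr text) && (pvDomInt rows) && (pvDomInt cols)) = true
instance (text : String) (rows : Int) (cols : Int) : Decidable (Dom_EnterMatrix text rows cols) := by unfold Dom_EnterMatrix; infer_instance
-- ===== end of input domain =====

-- B replaces A's single running index and per-cell branch by per-row slicing with block
-- padding (objective: simpler); same return value everywhere, both are total.

-- ===== PORT A =====
def EnterMatrix (text : String) (rows : Int) (cols : Int) : List (List String) :=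
  let s := text.toList
  -- matrix = [[None for _ in range(cols)] for _ in range(rows)]; the None placeholder is
  -- ported as "" — every cell is overwritten before the matrix is returned
  let matrix0 : List (List String) :=
    (PySem.List.pyRange 0 rows 1).map (fun _ => (PySem.List.pyRange 0 cols 1).map (fun _ => ""))
  let final :=
    (PySem.List.pyRange 0 rows 1).foldl
      (fun (st : Int × List (List String)) row =>
        (PySem.List.pyRange 0 cols 1).foldl
          (fun (st2 : Int × List (List String)) col =>
            (st2.1 + 1,
             st2.2.set row.toNat ((st2.2.getD row.toNat []).set col.toNat
               (if st2.1 < (s.length : Int) then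
                  -- text[index]: a one-character Python str; in range under the guard
                  ((PySem.List.pyGet? s st2.1).map (fun c => String.ofList [c])).getD "_"
                else "_"))))
          st)
      (0, matrix0)
  final.2

-- ===== PORT B =====
def EnterMatrix_alt (text : String) (rows : Int) (cols : Int) : List (List String) :=
  let cols' := max cols 0
  (PySem.List.pyRange 0 rows 1).foldl
    (fun (matrix : List (List String)) row =>
      let chunk := PySem.List.slice text.toList (some (row * cols')) (some ((row + 1) * cols'))
      matrix ++ [chunk.map (fun c => String.ofList [c]) ++
                 List.replicate ((cols' - (chunk.length : Int)).toNat) "_"])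
    []

-- ===== PRECONDITION & SPEC =====
def Spec_EnterMatrix (text : String) (rows : Int) (cols : Int) (out : List (List String)) : Prop := out = EnterMatrix_alt text rows cols
instance (text : String) (rows : Int) (cols : Int) (out : List (List String)) : Decidable (Spec_EnterMatrix text rows cols out) := by unfold Spec_EnterMatrix; infer_instance

-- ===== CLAIM (what is proved, stated in full; the proofs are below) =====
def Claim_equal_EnterMatrix : Prop := ∀ (text : String) (rows : Int) (cols : Int), Dom_EnterMatrix text rows cols → Spec_EnterMatrix text rows cols (EnterMatrix text rows cols)

-- ===== LEMMAS AND PROOFS =====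

-- the value A writes into the cell reached with running index j
def pvCell (s : List Char) (j : Nat) : String :=
  if h : j < s.length then String.ofList [s[j]] else "_"

-- the row both programs produce for row index r (C = number of columns)
def pvRow (s : List Char) (C r : Nat) : List String :=
  (List.range C).map (fun c => pvCell s (r * C + c))

theorem pv_cell_eq (s : List Char) (j : Nat) :
    (if (j : Int) < (s.length : Int) then
        ((PySem.List.pyGet? s (j : Int)).map (fun c => String.ofList [c])).getD "_"
      else "_") = pvCell s j := by
  by_cases h : j < s.length
  · simp [pvCell, h]
  · simp [pvCell, h]

theorem pv_set_append {α : Type} (xs : List α) (y : α) (ys : List α) (v : α) :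
    (xs ++ y :: ys).set xs.length v = xs ++ v :: ys := by
  induction xs with
  | nil => rfl
  | cons a t ih => simp [ih]

theorem pv_getD_append {α : Type} (xs : List α) (y : α) (ys : List α) (d : α) :
    (xs ++ y :: ys).getD xs.length d = y := by
  simp [List.getD]

-- inner loop: the columns pre.length, pre.length+1, … are written one by one into row
-- number mpre.length of the matrix, whose current content is pre ++ suffA
theorem pv_inner (s : List Char) (pre suffA : List String)
    (mpre mpost : List (List String)) (k : Nat) (i : Nat) (hlen : suffA.length = k) :
    (((List.range k).map (fun c : Nat => ((pre.length + c : Nat) : Int))).foldl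
        (fun (st2 : Int × List (List String)) col =>
          (st2.1 + 1,
           st2.2.set mpre.length ((st2.2.getD mpre.length []).set col.toNat
             (if st2.1 < (s.length : Int) then
                ((PySem.List.pyGet? s st2.1).map (fun c => String.ofList [c])).getD "_"
              else "_"))))
        ((i : Int), mpre ++ (pre ++ suffA) :: mpost))
      = (((i + k : Nat) : Int),
         mpre ++ (pre ++ (List.range k).map (fun c => pvCell s (i + c))) :: mpost) := by
  induction k generalizing pre suffA i with
  | zero =>
    rw [List.length_eq_zero_iff] at hlen; subst hlen; simp
  | succ k ih =>
    match suffA, hlen with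
    | a :: t, hlen =>
      have ht : t.length = k := by simpa using hlen
      rw [List.range_succ_eq_map]
      simp only [List.map_cons, List.foldl_cons, Nat.add_zero, Int.toNat_natCast,
        pv_cell_eq s i, pv_getD_append, pv_set_append, List.map_map]
      have h1 : ((i : Int) + 1) = ((i + 1 : Nat) : Int) := by push_cast; ring
      have h2 : pre ++ pvCell s i :: t = (pre ++ [pvCell s i]) ++ t := by simp
      have h3 : (List.range k).map ((fun c : Nat => ((pre.length + c : Nat) : Int)) ∘ Nat.succ)
          = (List.range k).map
              (fun c : Nat => (((pre ++ [pvCell s i]).length + c : Nat) : Int)) := by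
        apply List.map_congr_left; intro x _
        simp; omega
      rw [h1, h2, h3, ih (pre ++ [pvCell s i]) t (i + 1) ht]
      simp only [Prod.mk.injEq]
      constructor
      · push_cast; ring
      · simp only [List.append_assoc, List.singleton_append]
        congr 2
        refine congrArg (pre ++ ·) (List.cons_eq_cons.mpr ⟨rfl, ?_⟩)
        apply List.map_congr_left; intro x _
        simp only [Function.comp_apply]
        congr 1; omega

-- outer loop: rows done, done+1, … are filled in turn; macc holds the finished rows
theorem pv_outer (s : List Char) (C : Nat) (k done : Nat) (macc : List (List String))
    (hm : macc.length = done) :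
    (((List.range k).map (fun r : Nat => ((done + r : Nat) : Int))).foldl
        (fun (st : Int × List (List String)) row =>
          ((List.range C).map (fun c : Nat => (c : Int))).foldl
            (fun (st2 : Int × List (List String)) col =>
              (st2.1 + 1,
               st2.2.set row.toNat ((st2.2.getD row.toNat []).set col.toNat
                 (if st2.1 < (s.length : Int) then
                    ((PySem.List.pyGet? s st2.1).map (fun c => String.ofList [c])).getD "_"
                  else "_"))))
            st)
        (((done * C : Nat) : Int), macc ++ List.replicate k (List.replicate C "")))
      = ((((done + k) * C : Nat) : Int),
         macc ++ (List.range k).map (fun r => pvRow s C (done + r))) := by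
  induction k generalizing done macc with
  | zero => simp
  | succ k ih =>
    rw [List.range_succ_eq_map]
    simp only [List.map_cons, List.foldl_cons, List.replicate_succ, List.map_map,
      Nat.add_zero, Int.toNat_natCast]
    subst hm
    have hrow := pv_inner s [] (List.replicate C "") macc
        (List.replicate k (List.replicate C "")) C (macc.length * C) (by simp)
    simp only [List.nil_append, List.length_nil, Nat.zero_add] at hrow
    rw [hrow]
    have h3 : (List.range k).map ((fun r : Nat => ((macc.length + r : Nat) : Int)) ∘ Nat.succ)
        = (List.range k).map
            (fun r : Nat =>
              (((macc ++ [(List.range C).map (fun c => pvCell s (macc.length * C + c))]).length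
                 + r : Nat) : Int)) := by
      apply List.map_congr_left; intro x _
      simp; omega
    have h4 : ((macc.length * C + C : Nat) : Int)
        = (((macc ++ [(List.range C).map (fun c => pvCell s (macc.length * C + c))]).length
            * C : Nat) : Int) := by
      simp [Nat.succ_mul]
    have h5 : macc ++ ((List.range C).map fun c => pvCell s (macc.length * C + c))
          :: List.replicate k (List.replicate C "")
        = (macc ++ [(List.range C).map (fun c => pvCell s (macc.length * C + c))])
          ++ List.replicate k (List.replicate C "") := by
      simp
    rw [h3, h4, h5,
      ih (macc ++ [(List.range C).map (fun c => pvCell s (macc.length * C + c))]).length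
        (macc ++ [(List.range C).map (fun c => pvCell s (macc.length * C + c))]) rfl]
    simp only [Prod.mk.injEq]
    constructor
    · norm_cast
      simp only [List.length_append, List.length_cons, List.length_nil]
      ring
    · simp only [List.append_assoc, List.singleton_append, List.length_append,
        List.length_cons, List.length_nil]
      refine congrArg (macc ++ ·) (List.cons_eq_cons.mpr ⟨?_, ?_⟩)
      · simp [pvRow]
      · apply List.map_congr_left; intro x _
        simp only [Function.comp_apply]
        congr 1
        omega

-- the row B builds from the slice starting at j equals A's row of cells j, j+1, …
theorem pv_rowB (s : List Char) (C j : Nat) :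
    ((s.drop j).take C).map (fun c => String.ofList [c])
      ++ List.replicate (C - ((s.drop j).take C).length) "_"
    = (List.range C).map (fun c => pvCell s (j + c)) := by
  induction C generalizing j with
  | zero => simp
  | succ C ih =>
    by_cases h : j < s.length
    · rw [List.drop_eq_getElem_cons h]
      simp only [List.take_succ_cons, List.map_cons, List.length_cons]
      rw [List.range_succ_eq_map]
      simp only [List.map_cons, List.map_map, Nat.add_zero, List.cons_append]
      refine List.cons_eq_cons.mpr ⟨?_, ?_⟩
      · simp [pvCell, h]
      · have hsub : C + 1 - (((s.drop (j + 1)).take C).length + 1)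
            = C - ((s.drop (j + 1)).take C).length := by omega
        rw [hsub, ih (j + 1)]
        apply List.map_congr_left; intro x _
        simp only [Function.comp_apply]
        congr 1; omega
    · have hd : s.drop j = [] := List.drop_eq_nil_iff.mpr (by omega)
      rw [hd]
      simp only [List.take_nil, List.map_nil, List.length_nil, Nat.sub_zero, List.nil_append]
      symm
      have hall : ∀ c ∈ List.range (C + 1), pvCell s (j + c) = (fun _ : Nat => "_") c := by
        intro c _; simp [pvCell]; omega
      rw [List.map_congr_left hall, List.map_const', List.length_range]

-- B computes row r as pvRow
theorem pv_alt (text : String) (rows cols : Int) :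
    EnterMatrix_alt text rows cols
      = (List.range rows.toNat).map (fun r => pvRow text.toList cols.toNat r) := by
  have hmax : max cols 0 = ((cols.toNat : Nat) : Int) := (Int.toNat_eq_max cols).symm
  simp only [EnterMatrix_alt, hmax]
  rw [PySem.List.pyRange_one]
  simp only [Int.sub_zero, Int.zero_add]
  rw [List.foldl_map, PySem.List.foldl_append_singleton_eq_map]
  simp only [List.nil_append]
  apply List.map_congr_left; intro r _
  have e1 : ((r : Int)) * ((cols.toNat : Nat) : Int) = ((r * cols.toNat : Nat) : Int) := by
    push_cast; ring
  have e2 : ((r : Int) + 1) * ((cols.toNat : Nat) : Int)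
      = ((r * cols.toNat : Nat) : Int) + ((cols.toNat : Nat) : Int) := by push_cast; ring
  rw [e1, e2, PySem.List.slice_natCast_add]
  have e3 : (((cols.toNat : Nat) : Int)
        - (((text.toList.drop (r * cols.toNat)).take cols.toNat).length : Int)).toNat
      = cols.toNat - ((text.toList.drop (r * cols.toNat)).take cols.toNat).length := by
    omega
  rw [e3, pv_rowB]
  rfl

-- A fills row r with pvRow
theorem pv_a (text : String) (rows cols : Int) :
    EnterMatrix text rows cols
      = (List.range rows.toNat).map (fun r => pvRow text.toList cols.toNat r) := by
  simp only [EnterMatrix]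
  rw [PySem.List.pyRange_one 0 rows, PySem.List.pyRange_one 0 cols]
  simp only [Int.sub_zero, Int.zero_add]
  have hmat : (List.map (fun _ => List.map (fun _ => "")
        (List.map (fun k : Nat => (k : Int)) (List.range cols.toNat)))
        (List.map (fun k : Nat => (k : Int)) (List.range rows.toNat)))
      = List.replicate rows.toNat (List.replicate cols.toNat "") := by
    simp [List.map_map, Function.comp_def, List.map_const']
  have hrows : List.map (fun k : Nat => (k : Int)) (List.range rows.toNat)
      = List.map (fun r : Nat => ((0 + r : Nat) : Int)) (List.range rows.toNat) := by
    simp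
  have hzero : (0 : Int) = ((0 * cols.toNat : Nat) : Int) := by simp
  rw [hmat, hrows, hzero,
    ← List.nil_append (List.replicate rows.toNat (List.replicate cols.toNat "")),
    pv_outer text.toList cols.toNat rows.toNat 0 [] rfl]
  simp

-- ===== VERDICT (by name: the statement is the Claim_ definition above) =====
theorem EnterMatrix_spec : Claim_equal_EnterMatrix := by
  intro text rows cols _
  show EnterMatrix text rows cols = EnterMatrix_alt text rows cols
  rw [pv_a, pv_alt]
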